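-- pv_equiv track=rewrite | github.com/Andrei4ik/bot | _logic.py | defclean
-- ===== SOURCE A (Python) =====
-- def defclean(string_line):
--     """
--     Очистка строки stringLine от тэгов и их содержимых
--     :param string_line: Очищаемая строка
--     :return: очищенная строка
--     """
--     result = ""
--     not_skip = True
--     for i in list(string_line):
--         if not_skip:
--             if i == "<":
--                 not_skip = False
--             else:
--                 result += i
--         else:
--             if i == ">":
--                 not_skip = True
--
--     return result
-- ===== SOURCE B (Python) =====
-- def defclean(string_line):
--     """Segment-based rewrite: jump between '<' and '>' with str.find instead of a per-character flag loop."""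
--     parts = []
--     i = 0
--     n = len(string_line)
--     while i < n:
--         lt = string_line.find('<', i)
--         if lt == -1:
--             parts.append(string_line[i:])
--             break
--         parts.append(string_line[i:lt])
--         gt = string_line.find('>', lt + 1)
--         if gt == -1:
--             break
--         i = gt + 1
--     return ''.join(parts)
-- ===== Notes on version B (the rewrite author's own statement) =====
-- stated objective: faster
-- what changed: Replaces the per-character boolean-flag loop by a segment scan that uses str.find to jump from '<' to the matching '>' and joins the kept slices, moving the work into C-level find/slice.
import Mathlib
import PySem

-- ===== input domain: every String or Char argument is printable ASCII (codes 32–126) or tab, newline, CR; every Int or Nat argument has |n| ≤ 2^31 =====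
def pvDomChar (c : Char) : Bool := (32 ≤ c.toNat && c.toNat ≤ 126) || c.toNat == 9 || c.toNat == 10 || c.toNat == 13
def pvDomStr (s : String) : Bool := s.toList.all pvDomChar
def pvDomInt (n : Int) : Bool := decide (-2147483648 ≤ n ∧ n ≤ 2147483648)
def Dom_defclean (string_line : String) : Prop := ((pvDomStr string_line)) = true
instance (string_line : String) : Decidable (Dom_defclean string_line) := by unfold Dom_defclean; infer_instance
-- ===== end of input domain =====

-- B replaces A's per-character skip-flag loop by a segment scan (find '<', then the matching '>'); return values proved equal.
-- ===== PORT A =====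
-- fold over the characters with A's loop state (result, not_skip); result += i ported as String.push
def defclean (string_line : String) : String :=
  (string_line.toList.foldl
    (fun (st : String × Bool) i =>
      if st.2 then
        if i = '<' then (st.1, false) else (st.1.push i, true)
      else
        if i = '>' then (st.1, true) else st)
    ("", true)).1

-- ===== PORT B =====
-- B's find-based segment scan: the slice up to the next '<' is takeWhile, the jump past '>' is dropWhile on the rest
-- find('<', i) = -1 ↔ the dropWhile below is empty; the kept slice string_line[i:lt] is the takeWhile;
-- i = gt + 1 is the .tail after dropping to '>'
def cleanSeg (cs : List Char) : List Char :=
  if _hr : cs.dropWhile (· ≠ '<') = [] then cs.takeWhile (· ≠ '<')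
  else
    if _h2 : (cs.dropWhile (· ≠ '<')).tail.dropWhile (· ≠ '>') = [] then cs.takeWhile (· ≠ '<')
    else cs.takeWhile (· ≠ '<') ++ cleanSeg ((cs.dropWhile (· ≠ '<')).tail.dropWhile (· ≠ '>')).tail
termination_by cs.length
decreasing_by
  have h1 := cs.length_dropWhile_le (fun x => decide (x ≠ '<'))
  have h3 := (List.dropWhile (fun x => decide (x ≠ '<')) cs).tail.length_dropWhile_le (fun x => decide (x ≠ '>'))
  have h4 := List.length_pos_of_ne_nil _hr
  have h5 := List.length_pos_of_ne_nil _h2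
  simp only [List.length_tail] at *
  omega

def defclean_alt (string_line : String) : String := String.ofList (cleanSeg string_line.toList)

-- ===== PRECONDITION & SPEC =====
def Spec_defclean (string_line : String) (out : String) : Prop := out = defclean_alt string_line
instance (string_line : String) (out : String) : Decidable (Spec_defclean string_line out) := by unfold Spec_defclean; infer_instance

-- ===== CLAIM (what is proved, stated in full; the proofs are below) =====
def Claim_equal_defclean : Prop := ∀ (string_line : String), Dom_defclean string_line → Spec_defclean string_line (defclean string_line)

-- ===== LEMMAS AND PROOFS =====

lemma cleanSeg_nil : cleanSeg [] = [] := by unfold cleanSeg; rfl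

lemma cleanSeg_cons_lt (cs : List Char) :
    cleanSeg ('<' :: cs) =
      (match cs.dropWhile (· ≠ '>') with
        | [] => []
        | _ :: u => cleanSeg u) := by
  conv_lhs => unfold cleanSeg
  simp only [List.takeWhile_cons, List.dropWhile_cons, ne_eq, decide_not, decide_true,
    Bool.not_true, if_false, List.tail_cons, reduceCtorEq, dite_false]
  split
  · next h =>
    rw [List.dropWhile_eq_nil_iff.mpr (by simp_all)]
  · next h =>
    obtain ⟨a, u, hu⟩ := List.exists_cons_of_ne_nil h
    simp [hu]

lemma cleanSeg_cons_ne (c : Char) (cs : List Char) (hc : c ≠ '<') :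
    cleanSeg (c :: cs) = c :: cleanSeg cs := by
  conv_lhs => unfold cleanSeg
  conv_rhs => unfold cleanSeg
  simp only [List.takeWhile_cons, List.dropWhile_cons, ne_eq, hc, decide_not,
    decide_false, Bool.not_false, if_true]
  split
  · rfl
  · split <;> simp

lemma fold_eq : ∀ (cs : List Char) (acc : String) (b : Bool),
    ((cs.foldl
      (fun (st : String × Bool) i =>
        if st.2 then
          if i = '<' then (st.1, false) else (st.1.push i, true)
        else
          if i = '>' then (st.1, true) else st)
      (acc, b)).1).toList =
      acc.toList ++
        (if b then cleanSeg cs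
         else
          match cs.dropWhile (· ≠ '>') with
          | [] => []
          | _ :: u => cleanSeg u) := by
  intro cs
  induction cs with
  | nil =>
    intro acc b
    cases b <;> simp [cleanSeg_nil]
  | cons c cs ih =>
    intro acc b
    cases b with
    | true =>
      by_cases hc : c = '<'
      · subst hc
        simp only [List.foldl_cons, if_true, ih, cleanSeg_cons_lt]
        simp
      · simp only [List.foldl_cons, if_neg hc, if_true, ih, cleanSeg_cons_ne c cs hc]
        simp
    | false =>
      by_cases hc : c = '>'
      · subst hc
        simp only [List.foldl_cons, Bool.false_eq_true, if_false, ih]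
        simp
      · simp only [List.foldl_cons, if_neg hc, Bool.false_eq_true, if_false, ih]
        simp [hc]

-- ===== VERDICT (by name: the statement is the Claim_ definition above) =====
theorem defclean_spec : Claim_equal_defclean := by
  intro s _
  show defclean s = defclean_alt s
  have h := fold_eq s.toList "" true
  simp only [if_true] at h
  apply String.toList_injective ?_
  · rw [defclean_alt]
    simpa [defclean] using h
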